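-- pv_equiv track=rewrite | github.com/yueyue200830/hog_contest | hog_contest/hog_contest.py | is_swap
-- ===== SOURCE A (Python) =====
-- def is_swap(player_score, opponent_score):
--     """
--     Return whether the two scores should be swapped
--     """
--     result = False
--     while player_score and opponent_score:
--         if player_score % 10 == opponent_score % 10:
--             result = True
--             break
--         player_score //= 10
--         opponent_score //= 10
--     return result
-- ===== SOURCE B (Python) =====
-- def is_swap(player_score, opponent_score):
--     """
--     Return whether the two scores should be swapped
--     """
--     if not player_score or not opponent_score:
--         return False
--     sp, so = str(player_score), str(opponent_score)
--     n = min(len(sp), len(so))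
--     return any(sp[-i] == so[-i] for i in range(1, n + 1))
-- ===== Notes on version B (the rewrite author's own statement) =====
-- stated objective: idiomatic
-- what changed: B converts both scores to decimal strings once and checks the suffix-aligned characters with any() over range, replacing A's arithmetic while-loop that repeatedly takes %10 and //=10 with a mutable result flag and break.
-- outside the precondition, e.g. on is_swap(-3, 17): A returns True, B returns False; on is_swap(-23, 3): A returns False, B returns True
import Mathlib
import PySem

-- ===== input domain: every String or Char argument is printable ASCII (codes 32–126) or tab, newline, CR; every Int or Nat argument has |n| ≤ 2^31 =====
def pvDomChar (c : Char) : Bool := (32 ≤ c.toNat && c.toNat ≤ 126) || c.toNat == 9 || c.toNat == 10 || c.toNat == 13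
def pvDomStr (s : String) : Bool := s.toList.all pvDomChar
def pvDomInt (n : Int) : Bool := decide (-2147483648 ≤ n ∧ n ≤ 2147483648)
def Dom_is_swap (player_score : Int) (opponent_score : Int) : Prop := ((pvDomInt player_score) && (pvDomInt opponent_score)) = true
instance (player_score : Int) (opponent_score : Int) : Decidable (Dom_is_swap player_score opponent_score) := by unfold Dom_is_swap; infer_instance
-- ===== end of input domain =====

-- B renders both scores as decimal strings once and compares the suffix-aligned characters
-- with any() over range, instead of A's arithmetic while-loop with %10 / //=10, a mutable
-- result flag and break (objective: idiomatic; not faster).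

-- ===== PORT A =====
-- the while-loop of A: `result` is the mutable flag, `break` returns immediately.
-- `fuel` only makes the loop total (the measure |p|+|o| strictly decreases, proved
-- sufficient in the lemmas below); the fuel-0 branch is never reached from `is_swap`.
def isSwapGo (fuel : Nat) (result : Bool) (player_score : Int) (opponent_score : Int) : Bool :=
  match fuel with
  | 0 => result
  | f + 1 =>
    if player_score ≠ 0 ∧ opponent_score ≠ 0 then
      if PySem.Int.mod player_score 10 = PySem.Int.mod opponent_score 10 then true
      else isSwapGo f result (PySem.Int.floordiv player_score 10) (PySem.Int.floordiv opponent_score 10)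
    else result

def is_swap (player_score : Int) (opponent_score : Int) : Bool :=
  isSwapGo (player_score.natAbs + opponent_score.natAbs + 1) false player_score opponent_score

-- ===== PORT B =====
-- `if not player_score or not opponent_score: return False`; then str() → PySem.Int.toStr,
-- len → PySem.Str.len, s[-i] → PySem.Str.pyGet? (the indices 1..n are always in range, so
-- the Option `==` below is exactly Python's char comparison), any(... for i in range(1, n+1))
-- → .any over PySem.List.pyRange.
def is_swap_alt (player_score : Int) (opponent_score : Int) : Bool :=
  if player_score == 0 || opponent_score == 0 then false
  else
    let sp := PySem.Int.toStr player_score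
    let so := PySem.Int.toStr opponent_score
    let n := min (PySem.Str.len sp) (PySem.Str.len so)
    (PySem.List.pyRange 1 (n + 1) 1).any
      (fun i => PySem.Str.pyGet? sp (-i) == PySem.Str.pyGet? so (-i))

-- ===== PRECONDITION & SPEC =====
-- Pre_ restricts to non-negative scores, the game's natural domain; on negative inputs A
-- compares the floor-division (10's-complement) digit streams while B's strings carry a
-- sign character, so the two may disagree outside Pre_ (examples in the claim's cites).
def Pre_is_swap (player_score : Int) (opponent_score : Int) : Prop :=
  0 ≤ player_score ∧ 0 ≤ opponent_score
instance (player_score : Int) (opponent_score : Int) : Decidable (Pre_is_swap player_score opponent_score) := by unfold Pre_is_swap; infer_instance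

def pvWitness_is_swap : Int × Int := (12, 32)

def Spec_is_swap (player_score : Int) (opponent_score : Int) (out : Bool) : Prop := out = is_swap_alt player_score opponent_score
instance (player_score : Int) (opponent_score : Int) (out : Bool) : Decidable (Spec_is_swap player_score opponent_score out) := by unfold Spec_is_swap; infer_instance

-- ===== CLAIM (what is proved, stated in full; the proofs are below) =====
def Claim_equal_is_swap : Prop := ∀ (player_score : Int) (opponent_score : Int), Dom_is_swap player_score opponent_score → Pre_is_swap player_score opponent_score → Spec_is_swap player_score opponent_score (is_swap player_score opponent_score)

-- ===== LEMMAS AND PROOFS =====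

-- both sides are reduced to the same normal form: "some aligned pair of the LSB-first
-- decimal digit lists matches", i.e. any (==) over (digits 10 a).zip (digits 10 b).

-- A-side: the while-loop computes the zip/any of the Nat digit lists
lemma isSwapGo_eq_digits : ∀ (f : Nat) (a b : Nat), a + b < f →
    isSwapGo f false (a : Int) (b : Int)
      = ((Nat.digits 10 a).zip (Nat.digits 10 b)).any (fun x => x.1 == x.2) := by
  intro f
  induction f with
  | zero => intro a b hf; omega
  | succ f ih =>
    intro a b hf
    simp only [isSwapGo]
    by_cases hc : (a : Int) ≠ 0 ∧ (b : Int) ≠ 0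
    · rw [if_pos hc]
      have ha : 0 < a := by omega
      have hb : 0 < b := by omega
      rw [Nat.digits_def' (by norm_num : 1 < 10) ha, Nat.digits_def' (by norm_num : 1 < 10) hb]
      simp only [List.zip_cons_cons, List.any_cons]
      have hm : ∀ (m : Nat), PySem.Int.mod (m : Int) 10 = ((m % 10 : Nat) : Int) :=
        fun m => by exact_mod_cast PySem.Int.mod_natCast m 10
      have hd : ∀ (m : Nat), PySem.Int.floordiv (m : Int) 10 = ((m / 10 : Nat) : Int) :=
        fun m => by exact_mod_cast PySem.Int.floordiv_natCast m 10
      rw [hm a, hm b, hd a, hd b]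
      have hda : a / 10 < a := Nat.div_lt_self ha (by norm_num)
      have hdb : b / 10 < b := Nat.div_lt_self hb (by norm_num)
      by_cases he : a % 10 = b % 10
      · rw [if_pos (by exact_mod_cast he)]
        simp [he]
      · rw [if_neg (by exact_mod_cast he)]
        rw [ih (a / 10) (b / 10) (by omega)]
        rw [beq_eq_false_iff_ne.mpr he, Bool.false_or]
    · rw [if_neg hc]
      rcases not_and_or.mp hc with h | h
      · have : a = 0 := by omega
        simp [this]
      · have : b = 0 := by omega
        simp [this]

-- Nat.toDigits (what str(n) prints) is the reversed digitChar image of Nat.digits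
lemma toDigitsCore_eq_digits (b : Nat) (hb : 1 < b) :
    ∀ (f n : Nat) (acc : List Char), 0 < n → n < f →
    Nat.toDigitsCore b f n acc = ((Nat.digits b n).map Nat.digitChar).reverse ++ acc := by
  intro f
  induction f with
  | zero => intro n acc h1 h2; omega
  | succ f ih =>
    intro n acc h1 h2
    rw [Nat.toDigitsCore, Nat.digits_def' hb h1]
    have hlt : n / b < n := Nat.div_lt_self h1 hb
    by_cases h : n / b = 0
    · rw [if_pos h, h, Nat.digits_zero]
      simp
    · rw [if_neg h, ih (n / b) _ (Nat.pos_of_ne_zero h) (by omega)]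
      simp

lemma toDigits_eq_digits (n : Nat) (h : 0 < n) :
    Nat.toDigits 10 n = ((Nat.digits 10 n).map Nat.digitChar).reverse := by
  rw [Nat.toDigits, toDigitsCore_eq_digits 10 (by norm_num) (n + 1) n [] h (by omega)]
  simp

-- digitChar is injective on decimal digits
lemma digitChar_beq (d e : Nat) (hd : d < 10) (he : e < 10) :
    (Nat.digitChar d == Nat.digitChar e) = (d == e) := by
  interval_cases d <;> interval_cases e <;> decide

-- indexing the digitChar images over range(min len) is the zip/any of the digit lists
lemma any_range_min_eq_zip : ∀ (xs ys : List Nat), (∀ x ∈ xs, x < 10) → (∀ y ∈ ys, y < 10) →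
    (List.range (min xs.length ys.length)).any
        (fun k => (xs.map Nat.digitChar)[k]? == (ys.map Nat.digitChar)[k]?)
      = (xs.zip ys).any (fun x => x.1 == x.2) := by
  intro xs
  induction xs with
  | nil => intro ys _ _; simp
  | cons x xs ih =>
    intro ys hxs hys
    cases ys with
    | nil => simp
    | cons y ys =>
      simp only [List.length_cons, Nat.add_min_add_right, List.range_succ_eq_map,
        List.any_cons, List.any_map, List.zip_cons_cons]
      simp only [List.map_cons, List.getElem?_cons_zero, Option.some_beq_some]
      rw [digitChar_beq x y (hxs x (by simp)) (hys y (by simp))]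
      congr 1
      exact ih ys (fun z hz => hxs z (by simp [hz])) (fun z hz => hys z (by simp [hz]))

-- B-side: for positive scores, B computes the same zip/any of the digit lists
lemma alt_eq_digits (a b : Nat) (ha : 0 < a) (hb : 0 < b) :
    is_swap_alt (a : Int) (b : Int)
      = ((Nat.digits 10 a).zip (Nat.digits 10 b)).any (fun x => x.1 == x.2) := by
  unfold is_swap_alt
  rw [if_neg (by simp; omega)]
  have htl : ∀ (n : Nat), 0 < n →
      (PySem.Int.toStr (n : Int)).toList = ((Nat.digits 10 n).map Nat.digitChar).reverse := by
    intro n hn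
    rw [PySem.Int.toList_toStr]
    simp only [PySem.Int.toChars]
    rw [if_neg (by omega)]
    simp [toDigits_eq_digits n hn]
  have hlen : ∀ (n : Nat), 0 < n →
      PySem.Str.len (PySem.Int.toStr (n : Int)) = ((Nat.digits 10 n).length : Int) := by
    intro n hn
    rw [PySem.Str.len_eq, htl n hn]
    simp
  simp only [hlen a ha, hlen b hb]
  set dP := Nat.digits 10 a with hdP
  set dQ := Nat.digits 10 b with hdQ
  have hmin : min ((dP.length : Int)) ((dQ.length : Int)) = ((min dP.length dQ.length : Nat) : Int) := by
    omega
  rw [hmin, PySem.List.pyRange_one]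
  have htoNat : ((min dP.length dQ.length : Nat) : Int) + 1 - 1 = ((min dP.length dQ.length : Nat) : Int) := by ring
  rw [htoNat]
  rw [Int.toNat_natCast, List.any_map]
  rw [← any_range_min_eq_zip dP dQ
        (fun z hz => Nat.digits_lt_base (by norm_num) hz)
        (fun z hz => Nat.digits_lt_base (by norm_num) hz)]
  apply PySem.List.any_congr_mem
  intro k hk
  have hk' : k < min dP.length dQ.length := List.mem_range.mp hk
  have hidx : ∀ (n : Nat) (hn : 0 < n) (hkn : k < (Nat.digits 10 n).length),
      PySem.Str.pyGet? (PySem.Int.toStr (n : Int)) (-((1 : Int) + (k : Nat))) =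
        ((Nat.digits 10 n).map Nat.digitChar)[k]? := by
    intro n hn hkn
    have hneg : -((1 : Int) + (k : Nat)) = -(((k + 1 : Nat)) : Int) := by push_cast; ring
    rw [PySem.Str.pyGet?, PySem.Chars.pyGet?, hneg]
    rw [htl n hn]
    set M := (Nat.digits 10 n).map Nat.digitChar with hM
    have hLk : k < M.length := by simpa [hM] using hkn
    rw [PySem.List.pyGet?_neg_natCast M.reverse (k + 1) (by omega)
          (by simp [List.length_reverse]; omega)]
    rw [List.length_reverse]
    rw [List.getElem?_reverse (by omega)]
    congr 1
    omega
  simp only [Function.comp]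
  rw [hidx a ha (by simp [← hdP]; omega)]
  rw [hidx b hb (by simp [← hdQ]; omega)]

-- ===== VERDICT (by name: the statement is the Claim_ definition above) =====
theorem is_swap_spec : Claim_equal_is_swap := by
  intro p o _ hpre
  unfold Spec_is_swap
  obtain ⟨hp, ho⟩ := hpre
  obtain ⟨a, rfl⟩ : ∃ a : Nat, p = (a : Int) := ⟨p.toNat, by omega⟩
  obtain ⟨b, rfl⟩ : ∃ b : Nat, o = (b : Int) := ⟨o.toNat, by omega⟩
  unfold is_swap
  rw [isSwapGo_eq_digits _ a b (by omega)]
  by_cases ha : 0 < a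
  · by_cases hb : 0 < b
    · rw [alt_eq_digits a b ha hb]
    · have : b = 0 := by omega
      subst this
      simp [is_swap_alt]
  · have : a = 0 := by omega
    subst this
    simp [is_swap_alt]
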